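-- pv_equiv track=rewrite | github.com/remowxdx/AoC-2022 | aoc12.py | part2
-- ===== SOURCE A (Python) =====
-- def adjacent_positions(pos):
--     dirs = [(1, 0), (-1, 0), (0, 1), (0, -1)]
--     positions = []
--     for step in dirs:
--         positions.append((pos[0] + step[0], pos[1] + step[1]))
--     return positions
--
-- def next_steps(pos, hmap):
--     steps = []
--     for new_pos in adjacent_positions(pos):
--         if new_pos in hmap and hmap[new_pos] <= hmap[pos] + 1:
--             steps.append(new_pos)
--     return steps
--
-- def travel(hmap, start, end):
--     to_visit = [start]
--
--     path_len = {}
--     path_len[start] = 0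
--
--     while len(to_visit) > 0:
--         current_pos = to_visit.pop(0)
--
--         if current_pos == end:
--             return path_len[current_pos]
--
--         for next_step in next_steps(current_pos, hmap):
--             if next_step in path_len:
--                 continue
--             to_visit.append(next_step)
--             path_len[next_step] = path_len[current_pos] + 1
--
--     raise ValueError("No path.")
--
-- def part2(data):
--     hmap = {}
--     for y, line in enumerate(data):
--         for x, char in enumerate(line):
--             if char == "S":
--                 char = "a"
--             elif char == "E":
--                 end = (x, y)
--                 char = "z"
--             hmap[(x, y)] = ord(char) - ord("a")
--
--     shortest_path = len(hmap)
--
--     for start, height in hmap.items():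
--         if height == 0:
--             try:
--                 shortest_path = min(shortest_path, travel(hmap, start, end))
--             except ValueError:
--                 pass
--
--     return shortest_path
-- ===== SOURCE B (Python) =====
-- def back_nbrs(p, hmap):
--     x, y = p
--     return [q for q in ((x + 1, y), (x - 1, y), (x, y + 1), (x, y - 1))
--             if q in hmap and hmap[p] <= hmap[q] + 1]
--
-- def part2(data):
--     hmap = {}
--     end = None
--     for y, line in enumerate(data):
--         for x, char in enumerate(line):
--             if char == "E":
--                 end = (x, y)
--             hmap[(x, y)] = 0 if char == "S" else 25 if char == "E" else ord(char) - 97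
--     best = len(hmap)
--     if end is None:
--         return best
--     dist = {end: 0}
--     queue = [end]
--     head = 0
--     while head < len(queue):
--         cur = queue[head]
--         head += 1
--         for q in back_nbrs(cur, hmap):
--             if q not in dist:
--                 dist[q] = dist[cur] + 1
--                 queue.append(q)
--     for p, h in hmap.items():
--         if h == 0 and p in dist and dist[p] < best:
--             best = dist[p]
--     return best
-- ===== Notes on version B (the rewrite author's own statement) =====
-- stated objective: alternative
-- what changed: A runs a full forward BFS from every height-0 cell to the end; B runs a single reverse BFS from the end cell with the inverted edge rule and takes the minimum recorded distance over height-0 cells (worst-case asymptotics improve, but on the generated inputs both are parsing-dominated and measure the same).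
import Mathlib
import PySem

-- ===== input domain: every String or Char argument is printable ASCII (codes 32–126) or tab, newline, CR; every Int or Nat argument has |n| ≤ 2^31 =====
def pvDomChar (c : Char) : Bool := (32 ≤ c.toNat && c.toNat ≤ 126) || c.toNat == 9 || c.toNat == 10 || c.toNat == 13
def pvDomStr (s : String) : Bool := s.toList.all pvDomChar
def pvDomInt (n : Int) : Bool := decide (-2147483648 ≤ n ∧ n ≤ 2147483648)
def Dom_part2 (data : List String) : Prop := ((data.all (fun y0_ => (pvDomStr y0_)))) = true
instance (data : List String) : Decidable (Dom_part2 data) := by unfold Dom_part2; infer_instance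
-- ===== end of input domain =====

-- B replaces A's per-start BFS (one forward BFS from every height-0 cell) by a single reverse BFS
-- from the end cell with the inverted edge rule, then takes the minimum recorded distance over the
-- height-0 cells (objective: alternative — one traversal instead of one per start; measured running
-- time on the generated inputs is parsing-dominated and similar).

-- ===== PORT A =====
def adjacentPositions (pos : Int × Int) : List (Int × Int) :=
  [((1 : Int), (0 : Int)), (-1, 0), (0, 1), (0, -1)].foldl
    (fun positions step => positions ++ [(pos.1 + step.1, pos.2 + step.2)]) []

-- hmap[new_pos] / hmap[pos] are ported with getD: the `new_pos in hmap` guard and the call sites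
-- keep both keys present, so the default is never read (exact).
def nextSteps (pos : Int × Int) (hmap : PySem.Dict (Int × Int) Int) : List (Int × Int) :=
  (adjacentPositions pos).foldl
    (fun steps newPos =>
      if hmap.contains newPos ∧ hmap.getD newPos 0 ≤ hmap.getD pos 0 + 1 then steps ++ [newPos]
      else steps) []

def travelAux (hmap : PySem.Dict (Int × Int) Int) (endP : Int × Int) :
    Nat → List (Int × Int) → PySem.Dict (Int × Int) Int → Option Int
  | 0, _, _ => none        -- fuel guard only; the fuel passed by `travel` is never exhausted
  | _ + 1, [], _ => none   -- while loop exits: raise ValueError("No path.")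
  | fuel + 1, currentPos :: toVisit, pathLen =>
    if currentPos = endP then pathLen.get? currentPos
    else
      let st := (nextSteps currentPos hmap).foldl
        (fun (st : List (Int × Int) × PySem.Dict (Int × Int) Int) nextStep =>
          if st.2.contains nextStep then st
          else (st.1 ++ [nextStep], st.2.insert nextStep (st.2.getD currentPos 0 + 1)))
        (toVisit, pathLen)
      travelAux hmap endP fuel st.1 st.2

def travel (hmap : PySem.Dict (Int × Int) Int) (start endP : Int × Int) : Option Int :=
  travelAux hmap endP (hmap.size + 1) [start] (PySem.Dict.empty.insert start 0)

def parseA (data : List String) : PySem.Dict (Int × Int) Int × Option (Int × Int) :=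
  (PySem.List.enumerate data).foldl
    (fun st yline =>
      (PySem.List.enumerate yline.2.toList).foldl
        (fun st2 xchar =>
          if xchar.2 = 'S' then
            (st2.1.insert (xchar.1, yline.1) (('a'.toNat : Int) - ('a'.toNat : Int)), st2.2)
          else if xchar.2 = 'E' then
            (st2.1.insert (xchar.1, yline.1) (('z'.toNat : Int) - ('a'.toNat : Int)),
             some (xchar.1, yline.1))
          else
            (st2.1.insert (xchar.1, yline.1) ((xchar.2.toNat : Int) - ('a'.toNat : Int)), st2.2))
        st)
    (PySem.Dict.empty, none)

def part2 (data : List String) : Int :=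
  let st := parseA data
  let hmap := st.1
  -- `end` is an unbound name when no 'E' occurs; Pre_part2 excludes the inputs where that
  -- NameError is reachable, so the default (0, 0) is never used under Pre_part2.
  let endP := st.2.getD (0, 0)
  hmap.items.foldl
    (fun (shortestPath : Int) (item : (Int × Int) × Int) =>
      if item.2 = 0 then
        match travel hmap item.1 endP with
        | some v => min shortestPath v
        | none => shortestPath     -- except ValueError: pass
      else shortestPath)
    (hmap.size : Int)

-- ===== PORT B =====
def backNbrs (p : Int × Int) (hmap : PySem.Dict (Int × Int) Int) : List (Int × Int) :=
  [(p.1 + 1, p.2), (p.1 - 1, p.2), (p.1, p.2 + 1), (p.1, p.2 - 1)].filter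
    (fun q => hmap.contains q && decide (hmap.getD p 0 ≤ hmap.getD q 0 + 1))

def bfsAux (hmap : PySem.Dict (Int × Int) Int) :
    Nat → List (Int × Int) → PySem.Dict (Int × Int) Int → PySem.Dict (Int × Int) Int
  | 0, _, dist => dist       -- fuel guard only; the fuel passed by part2_alt is never exhausted
  | _ + 1, [], dist => dist  -- head == len(queue): while loop exits
  | fuel + 1, cur :: queue, dist =>
    let st := (backNbrs cur hmap).foldl
      (fun (st : List (Int × Int) × PySem.Dict (Int × Int) Int) q =>
        if st.2.contains q then st
        else (st.1 ++ [q], st.2.insert q (st.2.getD cur 0 + 1)))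
      (queue, dist)
    bfsAux hmap fuel st.1 st.2

def parseB (data : List String) : PySem.Dict (Int × Int) Int × Option (Int × Int) :=
  (PySem.List.enumerate data).foldl
    (fun st yline =>
      (PySem.List.enumerate yline.2.toList).foldl
        (fun st2 xchar =>
          (st2.1.insert (xchar.1, yline.1)
            (if xchar.2 = 'S' then 0
             else if xchar.2 = 'E' then 25
             else (xchar.2.toNat : Int) - 97),
           if xchar.2 = 'E' then some (xchar.1, yline.1) else st2.2))
        st)
    (PySem.Dict.empty, none)

def part2_alt (data : List String) : Int :=
  let st := parseB data
  let hmap := st.1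
  let best := (hmap.size : Int)
  match st.2 with
  | none => best
  | some e =>
    let dist := bfsAux hmap (hmap.size + 1) [e] (PySem.Dict.empty.insert e 0)
    hmap.items.foldl
      (fun (best : Int) (item : (Int × Int) × Int) =>
        if item.2 = 0 ∧ dist.contains item.1 ∧ dist.getD item.1 0 < best then dist.getD item.1 0
        else best)
      best

-- ===== PRECONDITION & SPEC =====
-- Pre_part2 excludes exactly the inputs on which A raises NameError: grids with no 'E' cell but
-- at least one height-0 cell ('a' or 'S'), where A reads the unbound variable `end`.
def Pre_part2 (data : List String) : Prop :=
  (data.any (fun line => line.toList.contains 'E') = true) ∨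
  (data.all (fun line => line.toList.all (fun c => !(c == 'a') && !(c == 'S'))) = true)
instance (data : List String) : Decidable (Pre_part2 data) := by unfold Pre_part2; infer_instance

def pvWitness_part2 : List String := ["aE", "bc"]

def Spec_part2 (data : List String) (out : Int) : Prop := out = part2_alt data
instance (data : List String) (out : Int) : Decidable (Spec_part2 data out) := by
  unfold Spec_part2; infer_instance

-- ===== CLAIM (what is proved, stated in full; the proofs are below) =====
def Claim_equal_part2 : Prop :=
  ∀ (data : List String), Dom_part2 data → Pre_part2 data → Spec_part2 data (part2 data)

-- ===== LEMMAS AND PROOFS =====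

-- Generic queue BFS over an adjacency function: both ports' loops are instances of it.
def gStep (nbrs : (Int × Int) → List (Int × Int)) (cur : Int × Int)
    (q : List (Int × Int)) (d : PySem.Dict (Int × Int) Int) :
    List (Int × Int) × PySem.Dict (Int × Int) Int :=
  (nbrs cur).foldl
    (fun st r =>
      if st.2.contains r then st
      else (st.1 ++ [r], st.2.insert r (st.2.getD cur 0 + 1)))
    (q, d)

def gBFS (nbrs : (Int × Int) → List (Int × Int)) :
    Nat → List (Int × Int) → PySem.Dict (Int × Int) Int → PySem.Dict (Int × Int) Int
  | 0, _, d => d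
  | _ + 1, [], d => d
  | fuel + 1, cur :: rest, d =>
    gBFS nbrs fuel (gStep nbrs cur rest d).1 (gStep nbrs cur rest d).2

-- Reach nbrs s n p: there is a walk of length n from s to p.
inductive Reach (nbrs : (Int × Int) → List (Int × Int)) (s : Int × Int) :
    Nat → (Int × Int) → Prop
  | refl : Reach nbrs s 0 s
  | step {n p q} : Reach nbrs s n p → q ∈ nbrs p → Reach nbrs s (n + 1) q

def MinD (nbrs : (Int × Int) → List (Int × Int)) (s p : Int × Int) (n : Nat) : Prop :=
  Reach nbrs s n p ∧ ∀ m < n, ¬ Reach nbrs s m p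

def Good (nbrs : (Int × Int) → List (Int × Int)) (keys : List (Int × Int)) : Prop :=
  (∀ p, (nbrs p).Nodup) ∧ (∀ p, ∀ r ∈ nbrs p, r ∈ keys) ∧ keys.Nodup

def BInv (nbrs : (Int × Int) → List (Int × Int)) (s : Int × Int) (keys : List (Int × Int))
    (q : List (Int × Int)) (d : PySem.Dict (Int × Int) Int) : Prop :=
  (∀ p ∈ q, d.contains p = true) ∧
  q.Nodup ∧
  (∀ p t, d.get? p = some t → ∃ n : Nat, t = (n : Int) ∧ MinD nbrs s p n) ∧
  (∀ p, d.contains p = true → p ∈ keys) ∧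
  (∀ p, d.contains p = true → p ∉ q → ∀ r ∈ nbrs p, d.contains r = true) ∧
  (∃ v : Nat, ∃ q1 q2, q = q1 ++ q2 ∧ (q1 = [] → q2 = []) ∧
    (∀ p ∈ q1, d.get? p = some (v : Int)) ∧ (∀ p ∈ q2, d.get? p = some ((v : Int) + 1)) ∧
    (∀ p m, MinD nbrs s p m → m ≤ v → d.contains p = true))

def Final (nbrs : (Int × Int) → List (Int × Int)) (s : Int × Int)
    (d : PySem.Dict (Int × Int) Int) : Prop :=
  (∀ p t, d.get? p = some t → ∃ n : Nat, t = (n : Int) ∧ MinD nbrs s p n) ∧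
  (∀ p n, MinD nbrs s p n → d.get? p = some (n : Int))

def mu (keys q : List (Int × Int)) (d : PySem.Dict (Int × Int) Int) : Nat :=
  (keys.filter (fun p => !d.contains p)).length + q.length

theorem reach_zero {nbrs s p} (h : Reach nbrs s 0 p) : p = s := by
  cases h; rfl
theorem reach_succ {nbrs s p n} (h : Reach nbrs s (n + 1) p) :
    ∃ x, Reach nbrs s n x ∧ p ∈ nbrs x := by
  cases h with
  | step h hm => exact ⟨_, h, hm⟩
theorem reach_cons {nbrs : (Int × Int) → List (Int × Int)} {s p t : Int × Int} {n : Nat}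
    (h : Reach nbrs s n t) (hs : s ∈ nbrs p) : Reach nbrs p (n + 1) t := by
  induction h with
  | refl => exact Reach.step Reach.refl hs
  | step _ hm ih => exact Reach.step ih hm
theorem exists_minD {nbrs s p n} (h : Reach nbrs s n p) : ∃ m ≤ n, MinD nbrs s p m := by
  induction n using Nat.strong_induction_on with
  | _ n ih =>
    by_cases hex : ∃ m, m < n ∧ Reach nbrs s m p
    · obtain ⟨m, hm, hr⟩ := hex
      obtain ⟨m', hm', hmin⟩ := ih m hm hr
      exact ⟨m', le_of_lt (lt_of_le_of_lt hm' hm), hmin⟩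
    · exact ⟨n, le_refl n, h, fun m hm hr => hex ⟨m, hm, hr⟩⟩
theorem minD_unique {nbrs s p n n'} (h : MinD nbrs s p n) (h' : MinD nbrs s p n') : n = n' := by
  rcases lt_trichotomy n n' with hlt | heq | hgt
  · exact absurd h.1 (h'.2 n hlt)
  · exact heq
  · exact absurd h'.1 (h.2 n' hgt)
theorem minD_pred {nbrs s p v} (h : MinD nbrs s p (v + 1)) :
    ∃ x, MinD nbrs s x v ∧ p ∈ nbrs x := by
  obtain ⟨x, hx, hm⟩ := reach_succ h.1
  obtain ⟨m, hmv, hmin⟩ := exists_minD hx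
  rcases eq_or_lt_of_le hmv with rfl | hlt
  · exact ⟨x, hmin, hm⟩
  · exact absurd (Reach.step hmin.1 hm) (h.2 (m + 1) (by omega))
theorem reach_mem_keys {nbrs keys s p n} (hg : Good nbrs keys) (hs : s ∈ keys)
    (h : Reach nbrs s n p) : p ∈ keys := by
  induction h with
  | refl => exact hs
  | step _ hm _ => exact hg.2.1 _ _ hm
theorem reach_flip {nbrsF nbrsR : (Int × Int) → List (Int × Int)} {keys : List (Int × Int)}
    {s p : Int × Int} {n : Nat}
    (hgF : Good nbrsF keys)
    (hedge : ∀ a b, a ∈ keys → b ∈ keys → (b ∈ nbrsF a ↔ a ∈ nbrsR b))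
    (hs : s ∈ keys) (h : Reach nbrsF s n p) : Reach nbrsR p n s := by
  induction h with
  | refl => exact Reach.refl
  | @step n a b h hm ih =>
    have ha : a ∈ keys := reach_mem_keys hgF hs h
    have hb : b ∈ keys := hgF.2.1 a b hm
    exact reach_cons ih ((hedge a b ha hb).1 hm)
theorem minD_flip {nbrsF nbrsR : (Int × Int) → List (Int × Int)} {keys : List (Int × Int)}
    {s p : Int × Int} {n : Nat}
    (hgF : Good nbrsF keys) (hgR : Good nbrsR keys)
    (hedge : ∀ a b, a ∈ keys → b ∈ keys → (b ∈ nbrsF a ↔ a ∈ nbrsR b))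
    (hs : s ∈ keys) (hp : p ∈ keys) :
    MinD nbrsF s p n ↔ MinD nbrsR p s n := by
  have hedge' : ∀ a b, a ∈ keys → b ∈ keys → (b ∈ nbrsR a ↔ a ∈ nbrsF b) :=
    fun a b ha hb => ((hedge b a hb ha).symm)
  constructor
  · exact fun h => ⟨reach_flip hgF hedge hs h.1,
      fun m hm hr => h.2 m hm (reach_flip hgR hedge' hp hr)⟩
  · exact fun h => ⟨reach_flip hgR hedge' hp h.1,
      fun m hm hr => h.2 m hm (reach_flip hgF hedge hs hr)⟩

theorem foldl_ins_get? (F : List (Int × Int)) (d : PySem.Dict (Int × Int) Int) (w : Int)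
    (p : Int × Int) :
    (F.foldl (fun dd r => dd.insert r w) d).get? p = if p ∈ F then some w else d.get? p := by
  induction F generalizing d with
  | nil => simp
  | cons x F ih =>
    simp only [List.foldl_cons, ih, PySem.Dict.get?_insert, List.mem_cons]
    by_cases h1 : p ∈ F <;> by_cases h2 : p = x <;> simp [h1, h2]

theorem foldl_pres {α σ : Type} (P : σ → Prop) (f : σ → α → σ) :
    ∀ (l : List α) (st : σ), (∀ st a, a ∈ l → P st → P (f st a)) → P st → P (l.foldl f st) := by
  intro l
  induction l with
  | nil => exact fun st _ h => h
  | cons x l ih =>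
    intro st hstep h
    exact ih _ (fun st a ha => hstep st a (List.mem_cons_of_mem _ ha))
      (hstep st x List.mem_cons_self h)

theorem countP_add_le {α : Type} (a b c : α → Bool) (l : List α)
    (h : ∀ x ∈ l, (a x = true → c x = true) ∧ (b x = true → c x = true) ∧
      ¬(a x = true ∧ b x = true)) :
    l.countP a + l.countP b ≤ l.countP c := by
  induction l with
  | nil => simp
  | cons x l ih =>
    simp only [List.countP_cons]
    have hx := h x (List.mem_cons_self)
    have hrec := ih (fun y hy => h y (List.mem_cons_of_mem _ hy))
    by_cases ha : a x = true <;> by_cases hb : b x = true <;>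
      simp [ha, hb, hx.1, hx.2.1] at * <;> omega

theorem gstep_mono (cur : Int × Int) :
    ∀ (l q : List (Int × Int)) (d : PySem.Dict (Int × Int) Int) (p : Int × Int),
      d.contains p = true →
      ((l.foldl (fun (st : List (Int × Int) × PySem.Dict (Int × Int) Int) r =>
          if st.2.contains r then st
          else (st.1 ++ [r], st.2.insert r (st.2.getD cur 0 + 1))) (q, d)).2.contains p = true ∧
       (l.foldl (fun (st : List (Int × Int) × PySem.Dict (Int × Int) Int) r =>
          if st.2.contains r then st
          else (st.1 ++ [r], st.2.insert r (st.2.getD cur 0 + 1))) (q, d)).2.get? p = d.get? p) := by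
  intro l
  induction l with
  | nil => exact fun q d p hp => ⟨hp, rfl⟩
  | cons x l ih =>
    intro q d p hp
    simp only [List.foldl_cons]
    by_cases hcx : d.contains x = true
    · simp only [hcx, if_true]
      exact ih q d p hp
    · have hne : p ≠ x := fun he => hcx (he ▸ hp)
      simp only [hcx, if_false, Bool.false_eq_true]
      have hp' : (d.insert x (d.getD cur 0 + 1)).contains p = true := by
        rw [PySem.Dict.contains_insert]; simp [hp]
      obtain ⟨h1, h2⟩ := ih (q ++ [x]) (d.insert x (d.getD cur 0 + 1)) p hp'
      refine ⟨h1, h2.trans ?_⟩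
      rw [PySem.Dict.get?_insert]
      simp [hne]

theorem gstep_char (nbrs : (Int × Int) → List (Int × Int)) (cur : Int × Int)
    (q : List (Int × Int)) (d : PySem.Dict (Int × Int) Int)
    (hnd : (nbrs cur).Nodup) (hc : d.contains cur = true) :
    gStep nbrs cur q d =
      (q ++ (nbrs cur).filter (fun r => !d.contains r),
       ((nbrs cur).filter (fun r => !d.contains r)).foldl
         (fun dd r => dd.insert r (d.getD cur 0 + 1)) d) := by
  have H : ∀ (l : List (Int × Int)), l.Nodup →
      ∀ (q : List (Int × Int)) (d : PySem.Dict (Int × Int) Int), d.contains cur = true →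
      l.foldl (fun (st : List (Int × Int) × PySem.Dict (Int × Int) Int) r =>
          if st.2.contains r then st
          else (st.1 ++ [r], st.2.insert r (st.2.getD cur 0 + 1))) (q, d) =
        (q ++ l.filter (fun r => !d.contains r),
         (l.filter (fun r => !d.contains r)).foldl
           (fun dd r => dd.insert r (d.getD cur 0 + 1)) d) := by
    intro l
    induction l with
    | nil => intro _ q d _; simp
    | cons x l ih =>
      intro hnd q d hc
      obtain ⟨hx, hl⟩ := List.nodup_cons.mp hnd
      by_cases hcx : d.contains x = true
      · simp only [List.foldl_cons, hcx, if_true, List.filter_cons, Bool.not_true,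
          Bool.false_eq_true, if_false]
        exact ih hl q d hc
      · have hcurx : cur ≠ x := fun he => hcx (he ▸ hc)
        have hc' : (d.insert x (d.getD cur 0 + 1)).contains cur = true := by
          rw [PySem.Dict.contains_insert]; simp [hc]
        have hgetD : (d.insert x (d.getD cur 0 + 1)).getD cur 0 = d.getD cur 0 := by
          rw [PySem.Dict.getD_insert]; simp [hcurx]
        have hfilter : l.filter (fun r => !(d.insert x (d.getD cur 0 + 1)).contains r) =
            l.filter (fun r => !d.contains r) := by
          apply List.filter_congr
          intro r hr
          have hrx : r ≠ x := fun he => hx (he ▸ hr)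
          rw [PySem.Dict.contains_insert]
          simp [hrx]
        simp only [List.foldl_cons, hcx, Bool.false_eq_true, if_false]
        rw [ih hl (q ++ [x]) (d.insert x (d.getD cur 0 + 1)) hc', hfilter, hgetD]
        simp only [List.filter_cons, hcx, Bool.not_false, if_true, List.foldl_cons,
          List.append_assoc, List.singleton_append]
  exact H (nbrs cur) hnd q d hc

theorem gBFS_get?_mono (nbrs : (Int × Int) → List (Int × Int)) (fuel : Nat)
    (q : List (Int × Int)) (d : PySem.Dict (Int × Int) Int) (p : Int × Int)
    (hp : d.contains p = true) : (gBFS nbrs fuel q d).get? p = d.get? p := by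
  induction fuel generalizing q d with
  | zero => rfl
  | succ fuel ih =>
    cases q with
    | nil => rfl
    | cons x rest =>
      obtain ⟨h1, h2⟩ := gstep_mono x (nbrs x) rest d p hp
      exact (ih (gStep nbrs x rest d).1 (gStep nbrs x rest d).2 h1).trans h2

theorem inv_step {nbrs keys s x rest d} (hg : Good nbrs keys)
    (hinv : BInv nbrs s keys (x :: rest) d) :
    BInv nbrs s keys (gStep nbrs x rest d).1 (gStep nbrs x rest d).2 ∧
    mu keys (gStep nbrs x rest d).1 (gStep nbrs x rest d).2 < mu keys (x :: rest) d := by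
  obtain ⟨hnodup, hclosed, hknd⟩ := hg
  obtain ⟨h1, h2, h3, h4, h5, v, q1, q2, hsplit, hnorm, hv1, hv2, hcomp⟩ := hinv
  have hcx : d.contains x = true := h1 x List.mem_cons_self
  rw [gstep_char nbrs x rest d (hnodup x) hcx]
  set F := (nbrs x).filter (fun r => !d.contains r) with hFdef
  set dF := F.foldl (fun dd r => dd.insert r (d.getD x 0 + 1)) d with hdFdef
  have hFm : ∀ r ∈ F, r ∈ nbrs x ∧ d.contains r = false := by
    intro r hr
    have h := List.mem_filter.mp hr
    exact ⟨h.1, by simpa using h.2⟩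
  have hFnd : F.Nodup := (hnodup x).filter _
  have hget : ∀ p, dF.get? p = if p ∈ F then some (d.getD x 0 + 1) else d.get? p :=
    fun p => foldl_ins_get? F d _ p
  have hcontF : ∀ p, dF.contains p = true ↔ (p ∈ F ∨ d.contains p = true) := by
    intro p
    rw [PySem.Dict.contains_eq_isSome_get?, hget p]
    by_cases hpF : p ∈ F
    · simp [hpF]
    · simp [hpF, ← PySem.Dict.contains_eq_isSome_get?]
  have hq1 : ∃ q1t, q1 = x :: q1t := by
    cases q1 with
    | nil => simp [hnorm rfl] at hsplit
    | cons a q1t =>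
      have ha : a = x := by
        have := congrArg (fun l => l.head?) hsplit
        simpa using this.symm
      exact ⟨q1t, by rw [ha]⟩
  obtain ⟨q1t, rfl⟩ := hq1
  have hrest : rest = q1t ++ q2 := by simpa using hsplit
  have hvx : d.get? x = some (v : Int) := hv1 x List.mem_cons_self
  have hgetDx : d.getD x 0 = (v : Int) := by rw [PySem.Dict.getD_eq_get?_getD, hvx]; rfl
  have hminx : MinD nbrs s x v := by
    obtain ⟨n, hn, hmind⟩ := h3 x _ hvx
    have hnv : n = v := by exact_mod_cast hn.symm
    exact hnv ▸ hmind
  have hnew : ∀ r ∈ F, MinD nbrs s r (v + 1) := by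
    intro r hr
    have hreach : Reach nbrs s (v + 1) r := Reach.step hminx.1 (hFm r hr).1
    obtain ⟨m, hmle, hmind⟩ := exists_minD hreach
    rcases eq_or_lt_of_le hmle with rfl | hlt
    · exact hmind
    · have hco := hcomp r m hmind (by omega)
      rw [(hFm r hr).2] at hco
      cases hco
  have hvalF : ∀ r ∈ F, dF.get? r = some ((v : Int) + 1) := by
    intro r hr; rw [hget r]; simp [hr, hgetDx]
  have hpres : ∀ p, p ∉ F → dF.get? p = d.get? p := by
    intro p hp; rw [hget p]; simp [hp]
  have hcontd : ∀ p, d.contains p = true → dF.contains p = true :=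
    fun p hp => (hcontF p).mpr (Or.inr hp)
  have hdisj : ∀ r ∈ rest, r ∉ F := by
    intro r hr hrF
    have hc := h1 r (List.mem_cons_of_mem _ hr)
    rw [(hFm r hrF).2] at hc
    cases hc
  constructor
  · refine ⟨?_, ?_, ?_, ?_, ?_, ?_⟩
    · intro p hp
      rcases List.mem_append.mp hp with hp | hp
      · exact hcontd p (h1 p (List.mem_cons_of_mem _ hp))
      · exact (hcontF p).mpr (Or.inl hp)
    · exact List.nodup_append.mpr
        ⟨(List.nodup_cons.mp h2).2, hFnd, fun a ha b hb he => hdisj a ha (he ▸ hb)⟩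
    · intro p t hsome
      by_cases hpF : p ∈ F
      · rw [hget p] at hsome
        simp only [hpF, if_true] at hsome
        have ht : t = (v : Int) + 1 := by rw [hgetDx] at hsome; exact (Option.some.inj hsome).symm
        exact ⟨v + 1, by push_cast; omega, hnew p hpF⟩
      · rw [hpres p hpF] at hsome
        exact h3 p t hsome
    · intro p hp
      rcases (hcontF p).mp hp with hpF | hpd
      · exact hclosed x p (hFm p hpF).1
      · exact h4 p hpd
    · intro p hp hnp
      rcases (hcontF p).mp hp with hpF | hpd
      · exact absurd (List.mem_append.mpr (Or.inr hpF)) hnp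
      · by_cases hpx : p = x
        · subst hpx
          intro r hr
          by_cases hcr : d.contains r = true
          · exact hcontd r hcr
          · exact (hcontF r).mpr (Or.inl (List.mem_filter.mpr ⟨hr, by simp [hcr]⟩))
        · have hpq : p ∉ x :: rest := by
            intro hmem
            rcases List.mem_cons.mp hmem with h | h
            · exact hpx h
            · exact hnp (List.mem_append.mpr (Or.inl h))
          intro r hr
          exact hcontd r (h5 p hpd hpq r hr)
    · cases q1t with
      | nil =>
        refine ⟨v + 1, q2 ++ F, [], by simp [hrest], fun _ => rfl, ?_, by simp, ?_⟩
        · intro p hp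
          rcases List.mem_append.mp hp with hp | hp
          · have hpnF : p ∉ F := hdisj p (by rw [hrest]; simpa using hp)
            have hval := hv2 p hp
            rw [hpres p hpnF, hval]
            push_cast
            rfl
          · have := hvalF p hp
            rw [this]
            push_cast
            rfl
        · intro p m hmind hm
          rcases Nat.lt_or_ge m (v + 1) with hlt | hge
          · exact hcontd p (hcomp p m hmind (by omega))
          · have hmeq : m = v + 1 := by omega
            subst hmeq
            obtain ⟨x', hx', hpx'⟩ := minD_pred hmind
            have hcx' : d.contains x' = true := hcomp x' v hx' (le_refl v)
            by_cases hx'q : x' ∈ x :: rest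
            · rcases List.mem_cons.mp hx'q with rfl | hx'rest
              · by_cases hcp : d.contains p = true
                · exact hcontd p hcp
                · exact (hcontF p).mpr (Or.inl (List.mem_filter.mpr ⟨hpx', by simp [hcp]⟩))
              · have hx'q2 : x' ∈ q2 := by rwa [hrest, List.nil_append] at hx'rest
                have hval := hv2 x' hx'q2
                obtain ⟨n, hn, hmind'⟩ := h3 x' _ hval
                have hn' : n = v + 1 := by exact_mod_cast hn.symm
                have := minD_unique hx' hmind'
                omega
            · exact hcontd p (h5 x' hcx' hx'q p hpx')
      | cons y q1tt =>
        refine ⟨v, y :: q1tt, q2 ++ F, by simp [hrest], by simp, ?_, ?_, ?_⟩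
        · intro p hp
          have hprest : p ∈ rest := by rw [hrest]; exact List.mem_append.mpr (Or.inl hp)
          rw [hpres p (hdisj p hprest)]
          exact hv1 p (List.mem_cons_of_mem _ hp)
        · intro p hp
          rcases List.mem_append.mp hp with hp | hp
          · have hprest : p ∈ rest := by rw [hrest]; exact List.mem_append.mpr (Or.inr hp)
            rw [hpres p (hdisj p hprest)]
            exact hv2 p hp
          · exact hvalF p hp
        · intro p m hmind hm
          exact hcontd p (hcomp p m hmind hm)
  · simp only [mu, List.length_append, List.length_cons]
    have hFsub : ∀ r ∈ F, r ∈ keys := fun r hr => hclosed x r (hFm r hr).1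
    have hkey : (keys.filter (fun p => !dF.contains p)).length + F.length ≤
        (keys.filter (fun p => !d.contains p)).length := by
      have hcount := countP_add_le (fun p => !dF.contains p) (fun p => decide (p ∈ F))
        (fun p => !d.contains p) keys ?_
      · have hperm : (keys.filter (fun p => decide (p ∈ F))).Perm F := by
          refine (List.perm_ext_iff_of_nodup (hknd.filter _) hFnd).mpr (fun a => ?_)
          simp only [List.mem_filter, decide_eq_true_eq]
          exact ⟨fun h => h.2, fun h => ⟨hFsub a h, h⟩⟩
        have hlen : (keys.filter (fun p => decide (p ∈ F))).length = F.length :=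
          hperm.length_eq
        have ha' : keys.countP (fun p => !dF.contains p) =
            (keys.filter (fun p => !dF.contains p)).length := List.countP_eq_length_filter
        have hb' : keys.countP (fun p => decide (p ∈ F)) =
            (keys.filter (fun p => decide (p ∈ F))).length := List.countP_eq_length_filter
        have hc' : keys.countP (fun p => !d.contains p) =
            (keys.filter (fun p => !d.contains p)).length := List.countP_eq_length_filter
        omega
      · intro p _
        refine ⟨?_, ?_, ?_⟩
        · intro ha
          by_cases hcp : d.contains p = true
          · have := hcontd p hcp
            simp [this] at ha
          · simp [hcp]
        · intro hb
          have hpF : p ∈ F := of_decide_eq_true hb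
          simp [(hFm p hpF).2]
        · rintro ⟨ha, hb⟩
          have hpF : p ∈ F := of_decide_eq_true hb
          have := (hcontF p).mpr (Or.inl hpF)
          simp [this] at ha
    omega

theorem inv_final {nbrs keys s d} (_hg : Good nbrs keys) (hinv : BInv nbrs s keys [] d) :
    Final nbrs s d := by
  obtain ⟨h1, h2, h3, h4, h5, v, q1, q2, hsplit, hnorm, hv1, hv2, hcomp⟩ := hinv
  have hcontains : ∀ n p, MinD nbrs s p n → d.contains p = true := by
    intro n
    induction n with
    | zero =>
      intro p hp
      have := reach_zero hp.1
      subst this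
      exact hcomp p 0 hp (Nat.zero_le v)
    | succ n ih =>
      intro p hp
      obtain ⟨x', hx', hpx'⟩ := minD_pred hp
      have hcx' : d.contains x' = true := ih x' hx'
      exact h5 x' hcx' (List.not_mem_nil) p hpx'
  refine ⟨h3, ?_⟩
  intro p n hp
  have hc := hcontains n p hp
  rw [PySem.Dict.contains_eq_isSome_get?] at hc
  obtain ⟨t, ht⟩ := Option.isSome_iff_exists.mp hc
  obtain ⟨n', hn', hmind'⟩ := h3 p t ht
  have := minD_unique hp hmind'
  subst this
  rw [ht, hn']

theorem gBFS_final {nbrs keys s} (hg : Good nbrs keys) :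
    ∀ (fuel : Nat) (q : List (Int × Int)) (d : PySem.Dict (Int × Int) Int),
      BInv nbrs s keys q d → mu keys q d ≤ fuel → Final nbrs s (gBFS nbrs fuel q d) := by
  intro fuel
  induction fuel with
  | zero =>
    intro q d hinv hmu
    cases q with
    | nil => exact inv_final hg hinv
    | cons x rest => simp [mu] at hmu
  | succ fuel ih =>
    intro q d hinv hmu
    cases q with
    | nil => exact inv_final hg hinv
    | cons x rest =>
      obtain ⟨hinv', hlt⟩ := inv_step hg hinv
      exact ih _ _ hinv' (by omega)

theorem travelAux_eq_gBFS {hmap : PySem.Dict (Int × Int) Int} {keys : List (Int × Int)}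
    {s endP : Int × Int} (hg : Good (fun p => nextSteps p hmap) keys) :
    ∀ (fuel : Nat) (q : List (Int × Int)) (d : PySem.Dict (Int × Int) Int),
      BInv (fun p => nextSteps p hmap) s keys q d → mu keys q d ≤ fuel →
      (d.contains endP = true → endP ∈ q) →
      travelAux hmap endP fuel q d =
        (gBFS (fun p => nextSteps p hmap) fuel q d).get? endP := by
  intro fuel
  induction fuel with
  | zero =>
    intro q d hinv hmu hend
    cases q with
    | nil =>
      show none = d.get? endP
      rcases hne : d.get? endP with _ | t
      · rfl
      · have : d.contains endP = true := by
          rw [PySem.Dict.contains_eq_isSome_get?, hne]; rfl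
        exact absurd (hend this) (List.not_mem_nil)
    | cons x rest => simp [mu] at hmu
  | succ fuel ih =>
    intro q d hinv hmu hend
    cases q with
    | nil =>
      show none = d.get? endP
      rcases hne : d.get? endP with _ | t
      · rfl
      · have : d.contains endP = true := by
          rw [PySem.Dict.contains_eq_isSome_get?, hne]; rfl
        exact absurd (hend this) (List.not_mem_nil)
    | cons x rest =>
      by_cases hxe : x = endP
      · subst hxe
        have hcx : d.contains x = true := hinv.1 x List.mem_cons_self
        rw [gBFS_get?_mono _ _ _ _ _ hcx]
        simp [travelAux]
      · obtain ⟨hinv', hlt⟩ := inv_step hg hinv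
        have hcx : d.contains x = true := hinv.1 x List.mem_cons_self
        have hstep := gstep_char (fun p => nextSteps p hmap) x rest d (hg.1 x) hcx
        have hend' : (gStep (fun p => nextSteps p hmap) x rest d).2.contains endP = true →
            endP ∈ (gStep (fun p => nextSteps p hmap) x rest d).1 := by
          intro hce
          rw [hstep]
          rw [hstep] at hce
          simp only at hce ⊢
          rw [PySem.Dict.contains_eq_isSome_get?, foldl_ins_get?] at hce
          by_cases hEF : endP ∈ (nextSteps x hmap).filter (fun r => !d.contains r)
          · exact List.mem_append.mpr (Or.inr hEF)
          · simp only [hEF, if_false] at hce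
            rw [← PySem.Dict.contains_eq_isSome_get?] at hce
            have := hend hce
            rcases List.mem_cons.mp this with h | h
            · exact absurd h.symm hxe
            · exact List.mem_append.mpr (Or.inl h)
        have := ih (gStep (fun p => nextSteps p hmap) x rest d).1
          (gStep (fun p => nextSteps p hmap) x rest d).2 hinv' (by omega) hend'
        simp only [travelAux, hxe, if_false, gBFS]
        exact this

theorem inv_init {nbrs keys} (s : Int × Int) (_hg : Good nbrs keys) (hs : s ∈ keys) :
    BInv nbrs s keys [s] (PySem.Dict.empty.insert s 0) ∧
    mu keys [s] (PySem.Dict.empty.insert s 0) ≤ keys.length + 1 := by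
  have hget : ∀ p, (PySem.Dict.empty.insert s 0).get? p =
      if p = s then some (0 : Int) else none := by
    intro p; rw [PySem.Dict.get?_insert]; simp
  have hcont : ∀ p : Int × Int, ((PySem.Dict.empty.insert s 0).contains p = true) ↔ p = s := by
    intro p; rw [PySem.Dict.contains_insert]; simp
  have hminD0 : MinD nbrs s s 0 := ⟨Reach.refl, fun m hm => absurd hm (by omega)⟩
  constructor
  · refine ⟨?_, by simp, ?_, ?_, ?_, 0, [s], [], by simp, fun _ => rfl, ?_, by simp, ?_⟩
    · intro p hp
      simp only [List.mem_singleton] at hp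
      exact (hcont p).mpr hp
    · intro p t hsome
      rw [hget] at hsome
      by_cases hps : p = s
      · simp only [hps, if_true] at hsome
        exact ⟨0, by simpa using hsome.symm, hps ▸ hminD0⟩
      · simp [hps] at hsome
    · intro p hp
      exact ((hcont p).mp hp) ▸ hs
    · intro p hp hnp
      exact absurd (by simp [(hcont p).mp hp]) hnp
    · intro p hp
      simp only [List.mem_singleton] at hp
      subst hp
      simp [hget]
    · intro p m hm h0
      interval_cases m
      have := reach_zero hm.1
      exact (hcont p).mpr this
  · simp only [mu, List.length_cons, List.length_nil]
    exact Nat.succ_le_succ (List.length_filter_le _ _)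

theorem final_cross {nbrsF nbrsR keys s e dF dR}
    (hgF : Good nbrsF keys) (hgR : Good nbrsR keys)
    (hedge : ∀ a b, a ∈ keys → b ∈ keys → (b ∈ nbrsF a ↔ a ∈ nbrsR b))
    (hs : s ∈ keys) (he : e ∈ keys)
    (hF : Final nbrsF s dF) (hR : Final nbrsR e dR) : dF.get? e = dR.get? s := by
  rcases hFe : dF.get? e with _ | t
  · rcases hRs : dR.get? s with _ | t'
    · rfl
    · obtain ⟨n, hn, hmind⟩ := hR.1 s t' hRs
      have := hF.2 e n ((minD_flip hgF hgR hedge hs he).mpr hmind)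
      rw [hFe] at this
      cases this
  · obtain ⟨n, hn, hmind⟩ := hF.1 e t hFe
    have := hR.2 s n ((minD_flip hgF hgR hedge hs he).mp hmind)
    rw [this, hn]

theorem bfsAux_eq_gBFS (hmap : PySem.Dict (Int × Int) Int) (fuel : Nat)
    (q : List (Int × Int)) (d : PySem.Dict (Int × Int) Int) :
    bfsAux hmap fuel q d = gBFS (fun p => backNbrs p hmap) fuel q d := by
  induction fuel generalizing q d with
  | zero => rfl
  | succ fuel ih =>
    cases q with
    | nil => rfl
    | cons x rest => exact ih _ _

theorem parseA_eq_parseB (data : List String) : parseA data = parseB data := by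
  unfold parseA parseB
  apply PySem.List.foldl_congr_mem
  intro acc yline _
  apply PySem.List.foldl_congr_mem
  intro acc2 xchar _
  by_cases hS : xchar.2 = 'S'
  · simp [hS]
  · by_cases hE : xchar.2 = 'E'
    · simp [hE]
    · simp [hS, hE]

theorem parseB_nodup_keys (data : List String) : (parseB data).1.keys.Nodup := by
  unfold parseB
  exact foldl_pres (fun (st : PySem.Dict (Int × Int) Int × Option (Int × Int)) => st.1.keys.Nodup) _ _ _
    (fun st yl _ h => foldl_pres (fun (st2 : PySem.Dict (Int × Int) Int × Option (Int × Int)) => st2.1.keys.Nodup) _ _ _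
      (fun st2 xc _ h2 => PySem.Dict.nodup_keys_insert _ _ _ h2) h)
    PySem.Dict.nodup_keys_empty

theorem parseB_end_mem (data : List String) {e : Int × Int} (h : (parseB data).2 = some e) :
    (parseB data).1.contains e = true := by
  have H : ∀ e', (parseB data).2 = some e' → (parseB data).1.contains e' = true := by
    unfold parseB
    refine foldl_pres (fun (st : PySem.Dict (Int × Int) Int × Option (Int × Int)) => ∀ e', st.2 = some e' → st.1.contains e' = true) _ _ _ ?_ ?_
    · intro st yl _ hst
      refine foldl_pres (fun (st2 : PySem.Dict (Int × Int) Int × Option (Int × Int)) => ∀ e', st2.2 = some e' → st2.1.contains e' = true) _ _ _ ?_ hst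
      intro st2 xc _ h2 e' he'
      by_cases hE : xc.2 = 'E'
      · simp only [hE, if_true] at he'
        have : (xc.1, yl.1) = e' := Option.some.inj he'
        rw [← this]
        exact PySem.Dict.contains_insert_self _ _ _
      · simp only [hE, if_false] at he'
        rw [PySem.Dict.contains_insert]
        simp [h2 e' he']
    · intro e' he'
      cases he'
  exact H e h

theorem parseB_end_none_no_E (data : List String) (h : (parseB data).2 = none) :
    ∀ line ∈ data, 'E' ∉ line.toList := by
  intro line hline hE
  -- once the end is set, it stays set through every later step
  have hpres : ∀ (l : List (Int × String)) (st : PySem.Dict (Int × Int) Int × Option (Int × Int)),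
      st.2.isSome = true →
      (l.foldl (fun st yline =>
        (PySem.List.enumerate yline.2.toList).foldl
          (fun st2 xchar =>
            (st2.1.insert (xchar.1, yline.1)
              (if xchar.2 = 'S' then 0
               else if xchar.2 = 'E' then 25
               else (xchar.2.toNat : Int) - 97),
             if xchar.2 = 'E' then some (xchar.1, yline.1) else st2.2))
          st) st).2.isSome = true := by
    intro l st hst
    refine foldl_pres (fun (st : PySem.Dict (Int × Int) Int × Option (Int × Int)) => st.2.isSome = true) _ _ _ ?_ hst
    intro st' yl _ hst'
    refine foldl_pres (fun (st2 : PySem.Dict (Int × Int) Int × Option (Int × Int)) => st2.2.isSome = true) _ _ _ ?_ hst'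
    intro st2 xc _ h2
    by_cases hEc : xc.2 = 'E' <;> simp [hEc, h2]
  -- a line that contains 'E' makes the end set
  have hsets : ∀ (cs : List Char) (y : Int)
      (st : PySem.Dict (Int × Int) Int × Option (Int × Int)), 'E' ∈ cs →
      ((PySem.List.enumerate cs).foldl
        (fun st2 xchar =>
          (st2.1.insert (xchar.1, y)
            (if xchar.2 = 'S' then 0
             else if xchar.2 = 'E' then 25
             else (xchar.2.toNat : Int) - 97),
           if xchar.2 = 'E' then some (xchar.1, y) else st2.2))
        st).2.isSome = true := by
    intro cs y st hcs
    obtain ⟨k, hk, hget⟩ := List.mem_iff_getElem.mp hcs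
    have hmem : ((0 : Int) + k, 'E') ∈ PySem.List.enumerate cs := by
      rw [PySem.List.mem_enumerate_iff]
      exact ⟨k, hk, by rw [hget]⟩
    obtain ⟨l1, l2, hsplit⟩ := List.append_of_mem hmem
    rw [hsplit, List.foldl_append, List.foldl_cons]
    refine foldl_pres (fun (st2 : PySem.Dict (Int × Int) Int × Option (Int × Int)) => st2.2.isSome = true) _ _ _ ?_ (by simp)
    intro st2 xc _ h2
    by_cases hEc : xc.2 = 'E' <;> simp [hEc, h2]
  obtain ⟨d1, d2, hdsplit⟩ := List.append_of_mem hline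
  have hfinal : (parseB data).2.isSome = true := by
    unfold parseB
    rw [hdsplit, PySem.List.enumerate_append, List.foldl_append]
    rw [show PySem.List.enumerate (line :: d2) ((0 : Int) + d1.length) =
      (((0 : Int) + d1.length, line) :: PySem.List.enumerate d2 ((0 : Int) + d1.length + 1))
      from PySem.List.enumerate_cons _ _ _, List.foldl_cons]
    exact hpres _ _ (hsets line.toList _ _ hE)
  rw [h] at hfinal
  cases hfinal

theorem parseB_no_zero (data : List String)
    (h : ∀ line ∈ data, ∀ c ∈ line.toList, c ≠ 'a' ∧ c ≠ 'S') :
    ∀ pr ∈ (parseB data).1.items, pr.2 ≠ 0 := by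
  unfold parseB
  refine foldl_pres (fun (st : PySem.Dict (Int × Int) Int × Option (Int × Int)) => ∀ pr ∈ st.1.items, pr.2 ≠ 0) _ _ _ ?_
    (fun pr hpr => absurd hpr (by simp [PySem.Dict.empty]))
  intro st yl hyl hst
  have hyl2 : yl.2 ∈ data := by
    rw [PySem.List.mem_enumerate_iff] at hyl
    obtain ⟨k, hk, hylk⟩ := hyl
    rw [hylk]
    exact List.getElem_mem hk
  refine foldl_pres (fun (st2 : PySem.Dict (Int × Int) Int × Option (Int × Int)) => ∀ pr ∈ st2.1.items, pr.2 ≠ 0) _ _ _ ?_ hst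
  intro st2 xc hxc h2 pr hpr
  have hxc2 : xc.2 ∈ yl.2.toList := by
    rw [PySem.List.mem_enumerate_iff] at hxc
    obtain ⟨k, hk, hxck⟩ := hxc
    rw [hxck]
    exact List.getElem_mem hk
  obtain ⟨hna, hnS⟩ := h yl.2 hyl2 xc.2 hxc2
  rcases (PySem.Dict.mem_items_insert _ _ _ _).mp hpr with hpr | hpr
  · rw [hpr]
    simp only [hnS, if_false]
    by_cases hEc : xc.2 = 'E'
    · simp [hEc]
    · simp only [hEc, if_false]
      intro h0
      have htn : xc.2.toNat = 97 := by omega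
      have : xc.2 = 'a' := by
        have := Char.ofNat_toNat xc.2
        rw [htn] at this
        exact this.symm
      exact hna this
  · exact h2 pr hpr.1


theorem mem_nextSteps (hmap : PySem.Dict (Int × Int) Int) (a b : Int × Int) :
    b ∈ nextSteps a hmap ↔
      ((b = (a.1 + 1, a.2) ∨ b = (a.1 - 1, a.2) ∨ b = (a.1, a.2 + 1) ∨ b = (a.1, a.2 - 1)) ∧
        hmap.contains b = true ∧ hmap.getD b 0 ≤ hmap.getD a 0 + 1) := by
  unfold nextSteps adjacentPositions
  rw [PySem.List.foldl_append_singleton_eq_map, PySem.List.foldl_append_ite_eq_filter]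
  simp only [List.nil_append, List.mem_filter, List.map_cons, List.map_nil, List.mem_cons,
    List.not_mem_nil, or_false, decide_eq_true_eq]
  constructor
  · rintro ⟨hmem, hcond⟩
    refine ⟨?_, hcond.1, by simpa using hcond.2⟩
    rcases hmem with h | h | h | h <;> rw [h] <;> simp [Prod.ext_iff] <;> omega
  · rintro ⟨hmem, hc, hh⟩
    refine ⟨?_, hc, by simpa using hh⟩
    rcases hmem with h | h | h | h <;> rw [h] <;> simp [Prod.ext_iff] <;> omega

theorem mem_backNbrs (hmap : PySem.Dict (Int × Int) Int) (a b : Int × Int) :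
    a ∈ backNbrs b hmap ↔
      ((a = (b.1 + 1, b.2) ∨ a = (b.1 - 1, b.2) ∨ a = (b.1, b.2 + 1) ∨ a = (b.1, b.2 - 1)) ∧
        hmap.contains a = true ∧ hmap.getD b 0 ≤ hmap.getD a 0 + 1) := by
  unfold backNbrs
  simp only [List.mem_filter, List.mem_cons, List.not_mem_nil, or_false, Bool.and_eq_true,
    decide_eq_true_eq]

theorem goodA (hmap : PySem.Dict (Int × Int) Int) (h : hmap.keys.Nodup) :
    Good (fun p => nextSteps p hmap) hmap.keys := by
  refine ⟨?_, ?_, h⟩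
  · intro p
    have hadj : (adjacentPositions p).Nodup := by
      unfold adjacentPositions
      rw [PySem.List.foldl_append_singleton_eq_map]
      simp [List.nodup_cons, Prod.ext_iff]
    dsimp only [nextSteps]
    rw [PySem.List.foldl_append_ite_eq_filter]
    simp only [List.nil_append]
    exact hadj.filter _
  · intro p r hr
    rw [mem_nextSteps] at hr
    exact (PySem.Dict.contains_iff_mem_keys hmap r).mp hr.2.1

theorem goodB (hmap : PySem.Dict (Int × Int) Int) (h : hmap.keys.Nodup) :
    Good (fun p => backNbrs p hmap) hmap.keys := by
  refine ⟨?_, ?_, h⟩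
  · intro p
    refine List.Nodup.filter _ ?_
    simp [List.nodup_cons, Prod.ext_iff]
    omega
  · intro p r hr
    rw [mem_backNbrs] at hr
    exact (PySem.Dict.contains_iff_mem_keys hmap r).mp hr.2.1

theorem edgeAB (hmap : PySem.Dict (Int × Int) Int) :
    ∀ a b, a ∈ hmap.keys → b ∈ hmap.keys →
      (b ∈ nextSteps a hmap ↔ a ∈ backNbrs b hmap) := by
  intro a b ha hb
  have hca : hmap.contains a = true := (PySem.Dict.contains_iff_mem_keys hmap a).mpr ha
  have hcb : hmap.contains b = true := (PySem.Dict.contains_iff_mem_keys hmap b).mpr hb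
  rw [mem_nextSteps, mem_backNbrs]
  simp only [hca, hcb, true_and]
  constructor
  · rintro ⟨hadj, hh⟩
    refine ⟨?_, hh⟩
    rcases hadj with h | h | h | h <;> rw [h] <;> simp [Prod.ext_iff]
  · rintro ⟨hadj, hh⟩
    refine ⟨?_, hh⟩
    rcases hadj with h | h | h | h <;> rw [h] <;> simp [Prod.ext_iff]

-- ===== VERDICT (by name: the statement is the Claim_ definition above) =====
theorem part2_spec : Claim_equal_part2 := by
  intro data _ hpre
  show part2 data = part2_alt data
  unfold part2 part2_alt
  rw [parseA_eq_parseB]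
  rcases hP : parseB data with ⟨hmap, eo⟩
  have hknd : hmap.keys.Nodup := by
    have := parseB_nodup_keys data
    rwa [hP] at this
  cases eo with
  | none =>
    dsimp only
    have hz : ∀ pr ∈ hmap.items, pr.2 ≠ 0 := by
      rcases hpre with hasE | hno
      · exfalso
        have hnoE := parseB_end_none_no_E data (by rw [hP])
        simp only [List.any_eq_true, List.contains_iff_mem] at hasE
        obtain ⟨l, hl, hEl⟩ := hasE
        exact hnoE l hl hEl
      · have hno' : ∀ line ∈ data, ∀ c ∈ line.toList, c ≠ 'a' ∧ c ≠ 'S' := by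
          simp only [List.all_eq_true, Bool.and_eq_true, Bool.not_eq_true',
            beq_eq_false_iff_ne] at hno
          exact hno
        have := parseB_no_zero data hno'
        rwa [hP] at this
    rw [PySem.List.foldl_congr_mem hmap.items _ (fun acc _ => acc) _
      (fun acc pr hpr => by simp [hz pr hpr])]
    exact PySem.List.foldl_ignore _ _
  | some e =>
    dsimp only
    have he : hmap.contains e = true := by
      have := parseB_end_mem data (e := e) (by rw [hP])
      rwa [hP] at this
    have ekeys : e ∈ hmap.keys := (PySem.Dict.contains_iff_mem_keys hmap e).mp he
    have hGA := goodA hmap hknd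
    have hGB := goodB hmap hknd
    have hedge := edgeAB hmap
    have hkeylen : hmap.keys.length = hmap.size := by
      simp [PySem.Dict.keys, PySem.Dict.size]
    rw [bfsAux_eq_gBFS]
    set dR := gBFS (fun p => backNbrs p hmap) (hmap.size + 1) [e]
      (PySem.Dict.empty.insert e 0) with hdR
    have hFinR : Final (fun p => backNbrs p hmap) e dR := by
      refine gBFS_final hGB _ _ _ (inv_init e hGB ekeys).1 ?_
      have := (inv_init (nbrs := fun p => backNbrs p hmap) (keys := hmap.keys) e hGB ekeys).2
      omega
    apply PySem.List.foldl_congr_mem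
    intro acc item hitem
    by_cases h0 : item.2 = 0
    · have pkeys : item.1 ∈ hmap.keys := PySem.Dict.mem_keys_of_mem_items _ hitem
      have hend0 : (PySem.Dict.empty.insert item.1 (0 : Int)).contains e = true →
          e ∈ [item.1] := by
        intro hce
        rw [PySem.Dict.contains_insert] at hce
        simp only [PySem.Dict.contains_empty, Bool.or_false, beq_iff_eq] at hce
        simp [hce]
      have hmu : mu hmap.keys [item.1] (PySem.Dict.empty.insert item.1 0) ≤ hmap.size + 1 := by
        have := (inv_init (nbrs := fun p => nextSteps p hmap) (keys := hmap.keys)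
          item.1 hGA pkeys).2
        omega
      have hFinF : Final (fun p => nextSteps p hmap) item.1
          (gBFS (fun p => nextSteps p hmap) (hmap.size + 1) [item.1]
            (PySem.Dict.empty.insert item.1 0)) :=
        gBFS_final hGA _ _ _ (inv_init item.1 hGA pkeys).1 hmu
      have htr : travel hmap item.1 e = dR.get? item.1 := by
        unfold travel
        rw [travelAux_eq_gBFS hGA _ _ _ (inv_init item.1 hGA pkeys).1 hmu hend0]
        exact final_cross hGA hGB hedge pkeys ekeys hFinF hFinR
      rcases hdr : dR.get? item.1 with _ | dv
      · have hcf : dR.contains item.1 = false := by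
          rw [PySem.Dict.contains_eq_isSome_get?, hdr]
          rfl
        simp [h0, htr, hdr, hcf]
      · have hct : dR.contains item.1 = true := by
          rw [PySem.Dict.contains_eq_isSome_get?, hdr]
          rfl
        have hgd : dR.getD item.1 0 = dv := by
          rw [PySem.Dict.getD_eq_get?_getD, hdr]
          rfl
        simp only [h0, if_true, Option.getD_some, htr, hdr, hct, hgd, true_and]
        rw [min_def]
        split_ifs <;> omega
    · simp [h0]
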